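-- pv_equiv track=rewrite | github.com/matcom-compilers-2019/cool-compiler | src/parsing/preprocess.py | preprocess_program
-- ===== SOURCE A (Python) =====
-- keywords = [
--     "class",
--     "else",
--     "false",
--     "fi",
--     "if",
--     "in",
--     "inherits",
--     "isvoid",
--     "let",
--     "loop",
--     "pool",
--     "then",
--     "while",
--     "case",
--     "esac",
--     "new",
--     "of",
--     "not",
--     "true",
--     "self"
-- ]
--
-- def next_word(program, idx):
--     i = idx
--     word = ""
--     while i < len(program) and not program[i] in [':',';',',','.','(',')','{','}','[',']','@','<','>','=','-','+',' ','*','/', '\n','\t','~']: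
--         word += program[i]
--         i += 1
--     if word == "" and i < len(program):
--         word = program[i]
--         i += 1
--     return word, i
--
-- def add__(keyword):
--     return "$$$"+keyword
--
-- def preprocess_program(program):
--     """
--     Points the keywords and remove single line comments.
--     """
--     i = 0
--     new_program = ""
--     while i < len(program):
--         word, i = next_word(program, i)
--         if word in keywords:
--             new_program += add__(word)
--         #Remove single line comments
--         elif word == '-':
--             w, i2 = next_word(program, i)
--             if w == '-':
--                 while w != '\n' and i2 < len(program):
--                     w, i2 = next_word(program, i2)
--                 i = i2
--             else:
--                 new_program += word
--         elif word == '(':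
--             w, i2 = next_word(program, i)
--             if w == '*':
--                 while i2 < len(program):
--                     w, i2 = next_word(program, i2)
--                     if w == '*':
--                         w, i2 = next_word(program, i2)
--                         if w == ')':
--                             break
--                 i = i2
--             else:
--                 new_program += word
--         else:
--             new_program += word
--     return new_program
-- ===== SOURCE B (Python) =====
-- keywords = [
--     "class", "else", "false", "fi", "if", "in", "inherits", "isvoid",
--     "let", "loop", "pool", "then", "while", "case", "esac", "new",
--     "of", "not", "true", "self"
-- ]
--
-- _DELIMS = set(":;,.(){}[]@<>=-+ */\n\t~")
--
--
-- def preprocess_program(program):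
--     """
--     Points the keywords and removes comments — single character-level pass
--     (state machine) instead of repeated tokenization.
--     """
--     out = []
--     buf = []
--     n = len(program)
--     i = 0
--
--     def flush():
--         if buf:
--             w = ''.join(buf)
--             out.append('$$$' + w if w in keywords else w)
--             buf.clear()
--
--     while i < n:
--         c = program[i]
--         if c not in _DELIMS:
--             buf.append(c)
--             i += 1
--             continue
--         flush()
--         if c == '-' and i + 1 < n and program[i + 1] == '-':
--             # line comment: skip through the newline (inclusive)
--             i += 2
--             while i < n:
--                 ch = program[i]
--                 i += 1
--                 if ch == '\n':
--                     break
--         elif c == '(' and i + 1 < n and program[i + 1] == '*':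
--             # block comment: close on '*' immediately followed by ')',
--             # pairing non-overlappingly ('**)' does not close)
--             i += 2
--             while i < n:
--                 if program[i] == '*':
--                     if i + 1 < n and program[i + 1] == ')':
--                         i += 2
--                         break
--                     i += 2
--                 else:
--                     i += 1
--         else:
--             out.append(c)
--             i += 1
--     flush()
--     return ''.join(out)
-- ===== Notes on version B (the rewrite author's own statement) =====
-- stated objective: faster
-- what changed: Replaces A's repeated next_word tokenization (which rebuilds word strings char-by-char with += and re-tokenizes comment bodies) by a single character-level state machine with a pending-identifier buffer and explicit line/block-comment skipping states, joining output pieces at the end.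
import Mathlib
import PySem

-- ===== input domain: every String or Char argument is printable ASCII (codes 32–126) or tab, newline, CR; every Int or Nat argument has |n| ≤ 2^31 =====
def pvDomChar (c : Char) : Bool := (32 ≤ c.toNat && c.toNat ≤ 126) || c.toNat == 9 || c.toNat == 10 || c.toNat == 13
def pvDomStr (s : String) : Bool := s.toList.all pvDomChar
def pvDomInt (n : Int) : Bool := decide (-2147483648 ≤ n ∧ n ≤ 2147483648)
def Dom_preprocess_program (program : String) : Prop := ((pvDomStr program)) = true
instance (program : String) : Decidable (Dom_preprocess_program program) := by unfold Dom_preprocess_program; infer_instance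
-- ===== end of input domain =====

-- B replaces A's repeated re-tokenization by a single character-level state machine
-- (normal / line-comment / block-comment with a pending-identifier buffer); same return value.

-- ===== PORT A =====

def pvKeywords : List String :=
  ["class","else","false","fi","if","in","inherits","isvoid","let","loop",
   "pool","then","while","case","esac","new","of","not","true","self"]

def isDelim (c : Char) : Bool :=
  ([':',';',',','.','(',')','{','}','[',']','@','<','>','=','-','+',' ','*','/','\n','\t','~'] : List Char).contains c

-- the word-building while loop inside next_word
def takeWord : List Char → List Char × List Char
  | [] => ([], [])
  | c :: cs =>
    if isDelim c then ([], c :: cs)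
    else
      let p := takeWord cs
      (c :: p.1, p.2)

theorem takeWord_snd_length_le (l : List Char) : (takeWord l).2.length ≤ l.length := by
  induction l with
  | nil => simp [takeWord]
  | cons c cs ih => by_cases h : isDelim c <;> simp [takeWord, h] <;> omega

-- next_word(program, idx), with the suffix of the program standing for the index
def nextWord (l : List Char) : List Char × List Char :=
  let p := takeWord l
  if p.1 = [] then
    match l with
    | [] => ([], [])
    | c :: cs => ([c], cs)
  else p

theorem nextWord_snd_length_lt (c : Char) (cs : List Char) :
    (nextWord (c :: cs)).2.length < (c :: cs).length := by
  by_cases h : isDelim c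
  · simp [nextWord, takeWord, h]
  · have := takeWord_snd_length_le cs
    simp [nextWord, takeWord, h]
    omega

theorem nextWord_snd_length_le (l : List Char) : (nextWord l).2.length ≤ l.length := by
  cases l with
  | nil => simp [nextWord, takeWord]
  | cons c cs => exact le_of_lt (nextWord_snd_length_lt c cs)

-- the line-comment skipping loop: while w != '\n' and i2 < len(program): w, i2 = next_word(program, i2)
def skipLineA (w : List Char) (l : List Char) : List Char :=
  if w = ['\n'] then l
  else
    match l with
    | [] => []
    | c :: cs =>
      let p := nextWord (c :: cs)
      skipLineA p.1 p.2
termination_by l.length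
decreasing_by exact nextWord_snd_length_lt c cs

theorem skipLineA_length_le (w : List Char) (l : List Char) : (skipLineA w l).length ≤ l.length := by
  fun_induction skipLineA with
  | case1 h => exact le_rfl
  | case2 h => exact le_rfl
  | case3 w h c cs p ih =>
    have hp : p = nextWord (c :: cs) := rfl
    rw [hp] at ih ⊢
    have := nextWord_snd_length_lt c cs
    omega

-- the block-comment skipping loop
def skipBlockA : List Char → List Char
  | [] => []
  | c :: cs =>
    let p := nextWord (c :: cs)
    if p.1 = ['*'] then
      let q := nextWord p.2
      if q.1 = [')'] then q.2 else skipBlockA q.2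
    else skipBlockA p.2
termination_by l => l.length
decreasing_by
  · have h1 := nextWord_snd_length_lt c cs
    have h2 := nextWord_snd_length_le (nextWord (c :: cs)).2
    simp at *
    omega
  · exact nextWord_snd_length_lt c cs

theorem skipBlockA_length_le (l : List Char) : (skipBlockA l).length ≤ l.length := by
  fun_induction skipBlockA with
  | case1 => exact le_rfl
  | case2 c cs p h1 q h2 =>
    have hp : p = nextWord (c :: cs) := rfl
    have hq : q = nextWord p.2 := rfl
    have g1 := nextWord_snd_length_lt c cs
    have g2 := nextWord_snd_length_le p.2
    rw [← hp] at g1; rw [← hq] at g2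
    omega
  | case3 c cs p h1 q h2 ih =>
    have hp : p = nextWord (c :: cs) := rfl
    have hq : q = nextWord p.2 := rfl
    have g1 := nextWord_snd_length_lt c cs
    have g2 := nextWord_snd_length_le p.2
    rw [← hp] at g1; rw [← hq] at g2
    omega
  | case4 c cs p h1 ih =>
    have hp : p = nextWord (c :: cs) := rfl
    have g1 := nextWord_snd_length_lt c cs
    rw [← hp] at g1
    omega

-- the main while loop of preprocess_program
def loopA : List Char → List Char
  | [] => []
  | c :: cs =>
    let p := nextWord (c :: cs)
    if String.ofList p.1 ∈ pvKeywords then ("$$$".toList ++ p.1) ++ loopA p.2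
    else if p.1 = ['-'] then
      let q := nextWord p.2
      if q.1 = ['-'] then loopA (skipLineA q.1 q.2)
      else p.1 ++ loopA p.2
    else if p.1 = ['('] then
      let q := nextWord p.2
      if q.1 = ['*'] then loopA (skipBlockA q.2)
      else p.1 ++ loopA p.2
    else p.1 ++ loopA p.2
termination_by l => l.length
decreasing_by
  · exact nextWord_snd_length_lt c cs
  · have h1 := nextWord_snd_length_lt c cs
    have h2 := nextWord_snd_length_le (nextWord (c :: cs)).2
    have h3 := skipLineA_length_le (nextWord (nextWord (c :: cs)).2).1 (nextWord (nextWord (c :: cs)).2).2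
    simp at *
    omega
  · exact nextWord_snd_length_lt c cs
  · have h1 := nextWord_snd_length_lt c cs
    have h2 := nextWord_snd_length_le (nextWord (c :: cs)).2
    have h3 := skipBlockA_length_le (nextWord (nextWord (c :: cs)).2).2
    simp at *
    omega
  · exact nextWord_snd_length_lt c cs
  · exact nextWord_snd_length_lt c cs

def preprocess_program (program : String) : String :=
  String.ofList (loopA program.toList)

-- ===== PORT B =====

-- flush(): emit the pending identifier buffer
def flushB (buf : List Char) : List Char :=
  if buf = [] then []
  else if String.ofList buf ∈ pvKeywords then "$$$".toList ++ buf
  else buf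

-- line-comment state: skip through the newline (inclusive)
def lineB : List Char → List Char
  | [] => []
  | c :: cs => if c = '\n' then cs else lineB cs

theorem lineB_length_le (l : List Char) : (lineB l).length ≤ l.length := by
  induction l with
  | nil => simp [lineB]
  | cons c cs ih => by_cases h : c = '\n' <;> simp [lineB, h] <;> omega

-- block-comment state: close on '*' immediately followed by ')' (non-overlapping pairing)
def blockB : List Char → List Char
  | [] => []
  | c :: cs =>
    if c = '*' then
      match cs with
      | [] => []
      | d :: ds => if d = ')' then ds else blockB ds
    else blockB cs
termination_by l => l.length
decreasing_by
  · simp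
  · simp

theorem blockB_length_le (l : List Char) : (blockB l).length ≤ l.length := by
  fun_induction blockB
  all_goals simp_all
  all_goals omega

-- the main while loop of B's state machine
def loopB (l : List Char) (buf : List Char) : List Char :=
  match l with
  | [] => flushB buf
  | c :: cs =>
    if ¬ isDelim c then loopB cs (buf ++ [c])
    else
      flushB buf ++
        (if c = '-' ∧ cs.head? = some '-' then loopB (lineB cs.tail) []
         else if c = '(' ∧ cs.head? = some '*' then loopB (blockB cs.tail) []
         else c :: loopB cs [])
termination_by l.length
decreasing_by
  · simp
  · have := lineB_length_le cs.tail
    cases cs <;> simp_all <;> omega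
  · have := blockB_length_le cs.tail
    cases cs <;> simp_all <;> omega
  · simp

def preprocess_program_alt (program : String) : String :=
  String.ofList (loopB program.toList [])

-- ===== PRECONDITION & SPEC =====
def Spec_preprocess_program (program : String) (out : String) : Prop := out = preprocess_program_alt program
instance (program : String) (out : String) : Decidable (Spec_preprocess_program program out) := by unfold Spec_preprocess_program; infer_instance

-- ===== CLAIM (what is proved, stated in full; the proofs are below) =====
def Claim_equal_preprocess_program : Prop := ∀ (program : String), Dom_preprocess_program program → Spec_preprocess_program program (preprocess_program program)

-- ===== LEMMAS AND PROOFS =====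

-- branch equation lemmas for the recursive definitions

theorem blockB_nil : blockB [] = [] := by rw [blockB.eq_def]

theorem loopA_nil : loopA [] = [] := by rw [loopA.eq_def]

theorem loopA_cons (c : Char) (cs : List Char) : loopA (c :: cs) =
    (if String.ofList (nextWord (c :: cs)).1 ∈ pvKeywords then
       ("$$$".toList ++ (nextWord (c :: cs)).1) ++ loopA (nextWord (c :: cs)).2
     else if (nextWord (c :: cs)).1 = ['-'] then
       (if (nextWord (nextWord (c :: cs)).2).1 = ['-'] then
          loopA (skipLineA (nextWord (nextWord (c :: cs)).2).1 (nextWord (nextWord (c :: cs)).2).2)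
        else (nextWord (c :: cs)).1 ++ loopA (nextWord (c :: cs)).2)
     else if (nextWord (c :: cs)).1 = ['('] then
       (if (nextWord (nextWord (c :: cs)).2).1 = ['*'] then
          loopA (skipBlockA (nextWord (nextWord (c :: cs)).2).2)
        else (nextWord (c :: cs)).1 ++ loopA (nextWord (c :: cs)).2)
     else (nextWord (c :: cs)).1 ++ loopA (nextWord (c :: cs)).2) := by
  conv_lhs => rw [loopA.eq_def]

theorem loopB_nil (buf : List Char) : loopB [] buf = flushB buf := by rw [loopB.eq_def]

theorem loopB_cons (c : Char) (cs buf : List Char) : loopB (c :: cs) buf =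
    (if ¬ isDelim c then loopB cs (buf ++ [c])
     else
       flushB buf ++
         (if c = '-' ∧ cs.head? = some '-' then loopB (lineB cs.tail) []
          else if c = '(' ∧ cs.head? = some '*' then loopB (blockB cs.tail) []
          else c :: loopB cs [])) := by
  conv_lhs => rw [loopB.eq_def]

theorem skipLineA_newline (l : List Char) : skipLineA ['\n'] l = l := by
  rw [skipLineA.eq_def]; simp

theorem skipLineA_nil (w : List Char) : skipLineA w [] = [] := by
  rw [skipLineA.eq_def]; split <;> rfl

theorem skipLineA_cons (w : List Char) (hw : w ≠ ['\n']) (c : Char) (cs : List Char) :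
    skipLineA w (c :: cs) = skipLineA (nextWord (c :: cs)).1 (nextWord (c :: cs)).2 := by
  conv_lhs => rw [skipLineA.eq_def]
  simp [hw]

theorem skipBlockA_nil : skipBlockA [] = [] := by rw [skipBlockA.eq_def]

theorem skipBlockA_cons (c : Char) (cs : List Char) : skipBlockA (c :: cs) =
    (if (nextWord (c :: cs)).1 = ['*'] then
       (if (nextWord (nextWord (c :: cs)).2).1 = [')'] then (nextWord (nextWord (c :: cs)).2).2
        else skipBlockA (nextWord (nextWord (c :: cs)).2).2)
     else skipBlockA (nextWord (c :: cs)).2) := by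
  conv_lhs => rw [skipBlockA.eq_def]

-- facts about tokens

theorem takeWord_decomp (l : List Char) :
    l = (takeWord l).1 ++ (takeWord l).2 ∧ ∀ c ∈ (takeWord l).1, isDelim c = false := by
  induction l with
  | nil => simp [takeWord]
  | cons c cs ih =>
    by_cases h : isDelim c
    · simp [takeWord, h]
    · simp only [takeWord, h, Bool.false_eq_true, if_false]
      refine ⟨by simpa using ih.1, ?_⟩
      intro x hx
      simp at hx
      rcases hx with rfl | hx
      · simpa using h
      · exact ih.2 x hx

theorem takeWord_append (buf r : List Char) (hb : ∀ c ∈ buf, isDelim c = false)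
    (hr : r = [] ∨ ∃ d t, r = d :: t ∧ isDelim d = true) :
    takeWord (buf ++ r) = (buf, r) := by
  induction buf with
  | nil =>
    rcases hr with rfl | ⟨d, t, rfl, hd⟩
    · simp [takeWord]
    · simp [takeWord, hd]
  | cons c cs ih =>
    have hc : isDelim c = false := hb c (by simp)
    simp only [List.cons_append, takeWord, hc, Bool.false_eq_true, if_false]
    rw [ih (fun x hx => hb x (by simp [hx]))]

theorem nextWord_word (buf r : List Char) (hne : buf ≠ []) (hb : ∀ c ∈ buf, isDelim c = false)
    (hr : r = [] ∨ ∃ d t, r = d :: t ∧ isDelim d = true) :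
    nextWord (buf ++ r) = (buf, r) := by
  unfold nextWord
  rw [takeWord_append buf r hb hr]
  simp [hne]

theorem nextWord_delim (c : Char) (cs : List Char) (h : isDelim c = true) :
    nextWord (c :: cs) = ([c], cs) := by
  unfold nextWord
  simp [takeWord, h]

theorem nextWord_nondelim (c : Char) (cs : List Char) (h : isDelim c = false) :
    nextWord (c :: cs) = takeWord (c :: cs) := by
  unfold nextWord
  simp [takeWord, h]

theorem nextWord_nil : nextWord [] = ([], []) := by simp [nextWord, takeWord]

-- word tokens (all non-delimiter chars) are never a single-delimiter token
theorem word_ne_single (w : List Char) (hw : ∀ c ∈ w, isDelim c = false) (d : Char)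
    (hd : isDelim d = true) : w ≠ [d] := by
  intro h; subst h
  have := hw d (by simp)
  simp [this] at hd

-- a single delimiter char is never a keyword (all keywords have length ≥ 2)
theorem single_not_keyword (c : Char) : String.ofList [c] ∉ pvKeywords := by
  intro h
  have hlen : ∀ s ∈ pvKeywords, 2 ≤ s.toList.length := by decide
  have h2 := hlen _ h
  rw [String.toList_ofList] at h2
  simp at h2

-- a word (non-delimiter chars) contains no '\n', so lineB passes over it
theorem lineB_skip (w t : List Char) (hw : ∀ c ∈ w, isDelim c = false) :
    lineB (w ++ t) = lineB t := by
  induction w with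
  | nil => rfl
  | cons c cs ih =>
    have hc : isDelim c = false := hw c (by simp)
    have hne : c ≠ '\n' := by intro h; subst h; simp [isDelim] at hc
    simp only [List.cons_append, lineB, if_neg hne]
    exact ih (fun x hx => hw x (by simp [hx]))

-- a word contains no '*', so blockB passes over it
theorem blockB_cons_ne_star (c : Char) (cs : List Char) (h : c ≠ '*') :
    blockB (c :: cs) = blockB cs := by
  conv_lhs => rw [blockB.eq_def]
  simp [h]

theorem blockB_skip (w t : List Char) (hw : ∀ c ∈ w, isDelim c = false) :
    blockB (w ++ t) = blockB t := by
  induction w with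
  | nil => rfl
  | cons c cs ih =>
    have hc : isDelim c = false := hw c (by simp)
    have hne : c ≠ '*' := by intro h; subst h; simp [isDelim] at hc
    rw [List.cons_append, blockB_cons_ne_star c _ hne]
    exact ih (fun x hx => hw x (by simp [hx]))

-- A's token-level line-comment skip equals B's char-level one
theorem skipLineA_eq_lineB (n : ℕ) (l : List Char) (hl : l.length ≤ n) (w : List Char)
    (hw : w ≠ ['\n']) : skipLineA w l = lineB l := by
  induction n generalizing l w with
  | zero =>
    have : l = [] := by cases l <;> simp_all
    subst this
    rw [skipLineA_nil]; rfl
  | succ n ih =>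
    cases l with
    | nil => rw [skipLineA_nil]; rfl
    | cons c cs =>
      rw [skipLineA_cons w hw c cs]
      by_cases hd : isDelim c
      · rw [nextWord_delim c cs hd]
        by_cases hc : c = '\n'
        · subst hc
          rw [skipLineA_newline]
          simp [lineB]
        · rw [ih cs (by simpa using hl) [c] (by simp [hc])]
          simp [lineB, hc]
      · rw [nextWord_nondelim c cs (by simpa using hd)]
        obtain ⟨hdec, hchars⟩ := takeWord_decomp (c :: cs)
        have hw' : (takeWord (c :: cs)).1 ≠ ['\n'] :=
          word_ne_single _ hchars '\n' (by decide)
        have hlen : (takeWord (c :: cs)).2.length ≤ n := by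
          have h1 : (takeWord (c :: cs)).2 = (takeWord cs).2 := by
            simp [takeWord, hd]
          rw [h1]
          have := takeWord_snd_length_le cs
          simp at hl
          omega
        rw [ih _ hlen _ hw']
        conv_rhs => rw [hdec]
        rw [lineB_skip _ _ hchars]

-- A's token-level block-comment skip equals B's char-level one
theorem skipBlockA_eq_blockB (n : ℕ) (l : List Char) (hl : l.length ≤ n) :
    skipBlockA l = blockB l := by
  induction n generalizing l with
  | zero =>
    have : l = [] := by cases l <;> simp_all
    subst this
    rw [skipBlockA_nil, blockB_nil]
  | succ n ih =>
    cases l with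
    | nil => rw [skipBlockA_nil, blockB_nil]
    | cons c cs =>
      rw [skipBlockA_cons c cs]
      simp only [List.length_cons] at hl
      by_cases hd : isDelim c
      · rw [nextWord_delim c cs hd]
        by_cases hstar : c = '*'
        · subst hstar
          rw [if_pos rfl]
          cases cs with
          | nil =>
            rw [nextWord_nil]
            rw [skipBlockA_nil]
            rw [show (([],[]) : List Char × List Char).1 = [] from rfl]
            rw [if_neg (show ¬(([] : List Char) = [')']) by simp), blockB.eq_def]
            simp
          | cons d ds =>
            simp only [List.length_cons] at hl
            by_cases hdd : isDelim d
            · rw [nextWord_delim d ds hdd]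
              by_cases hdp : d = ')'
              · subst hdp
                rw [if_pos rfl]
                conv_rhs => rw [blockB.eq_def]
                simp
              · rw [if_neg (show ¬([d] = [')']) by simp [hdp])]
                rw [ih ds (by omega)]
                conv_rhs => rw [blockB.eq_def]
                simp [hdp]
            · rw [nextWord_nondelim d ds (by simpa using hdd)]
              obtain ⟨hdec, hchars⟩ := takeWord_decomp (d :: ds)
              have hne : (takeWord (d :: ds)).1 ≠ [')'] :=
                word_ne_single _ hchars ')' (by decide)
              rw [if_neg hne]
              have h1 : (takeWord (d :: ds)).2 = (takeWord ds).2 := by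
                simp [takeWord, hdd]
              have hlen : (takeWord (d :: ds)).2.length ≤ n := by
                rw [h1]
                have := takeWord_snd_length_le ds
                omega
              rw [ih _ hlen]
              have hdne : d ≠ ')' := by
                intro h; subst h; simp [isDelim] at hdd
              conv_rhs => rw [blockB.eq_def]
              simp only [if_neg hdne]
              have hds : ds = (takeWord ds).1 ++ (takeWord ds).2 := by
                have := (takeWord_decomp (d :: ds)).1
                simp only [takeWord, hdd, Bool.false_eq_true, if_false] at this hchars ⊢
                simpa using this
              conv_lhs => rw [h1]
              conv_rhs => rw [hds]
              rw [blockB_skip _ _ (fun x hx => (takeWord_decomp ds).2 x hx)]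
              simp
        · rw [if_neg (show ¬([c] = ['*']) by simp [hstar])]
          rw [ih cs (by omega)]
          rw [blockB_cons_ne_star c cs hstar]
      · rw [nextWord_nondelim c cs (by simpa using hd)]
        obtain ⟨hdec, hchars⟩ := takeWord_decomp (c :: cs)
        have hne : (takeWord (c :: cs)).1 ≠ ['*'] :=
          word_ne_single _ hchars '*' (by decide)
        rw [if_neg hne]
        have h1 : (takeWord (c :: cs)).2 = (takeWord cs).2 := by
          simp [takeWord, hd]
        have hlen : (takeWord (c :: cs)).2.length ≤ n := by
          rw [h1]
          have := takeWord_snd_length_le cs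
          omega
        rw [ih _ hlen]
        conv_rhs => rw [hdec]
        rw [blockB_skip _ _ hchars]

-- flushing the pending buffer is exactly A's treatment of a trailing word
theorem loopA_word_only (buf : List Char) (hb : ∀ c ∈ buf, isDelim c = false) :
    loopA buf = flushB buf := by
  cases buf with
  | nil => rw [loopA_nil]; rfl
  | cons b bs =>
    rw [loopA_cons]
    have hnw : nextWord (b :: bs) = (b :: bs, []) := by
      have := nextWord_word (b :: bs) [] (by simp) hb (Or.inl rfl)
      simpa using this
    rw [hnw]
    have hnd : b :: bs ≠ ['-'] := word_ne_single _ hb '-' (by decide)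
    have hnp : b :: bs ≠ ['('] := word_ne_single _ hb '(' (by decide)
    simp only [hnd, hnp, if_false, loopA_nil, List.append_nil]
    unfold flushB
    simp

-- A's loop on a pending word followed by a delimiter first emits the flushed word
theorem loopA_word_prefix (buf : List Char) (c : Char) (cs : List Char)
    (hb : ∀ x ∈ buf, isDelim x = false) (hd : isDelim c = true) :
    loopA (buf ++ c :: cs) = flushB buf ++ loopA (c :: cs) := by
  cases buf with
  | nil => simp [flushB]
  | cons b bs =>
    have hbe : (b :: bs : List Char) ≠ [] := by simp
    rw [show (b :: bs) ++ c :: cs = b :: (bs ++ c :: cs) from rfl, loopA_cons,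
      show (b : Char) :: (bs ++ c :: cs) = (b :: bs) ++ c :: cs from rfl,
      nextWord_word (b :: bs) (c :: cs) hbe hb (Or.inr ⟨c, cs, rfl, hd⟩)]
    have hnd : (b :: bs : List Char) ≠ ['-'] := word_ne_single _ hb '-' (by decide)
    have hnp : (b :: bs : List Char) ≠ ['('] := word_ne_single _ hb '(' (by decide)
    simp only [hnd, hnp, if_false]
    unfold flushB
    rw [if_neg hbe]
    split <;> simp

-- main invariant: B's machine with pending buffer `buf` computes A's loop on `buf ++ l`
theorem loopB_eq_loopA (n : ℕ) (l buf : List Char) (hl : l.length ≤ n)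
    (hb : ∀ c ∈ buf, isDelim c = false) : loopB l buf = loopA (buf ++ l) := by
  induction n generalizing l buf with
  | zero =>
    have : l = [] := by cases l <;> simp_all
    subst this
    rw [loopB_nil, List.append_nil, loopA_word_only buf hb]
  | succ n ih =>
    cases l with
    | nil => rw [loopB_nil, List.append_nil, loopA_word_only buf hb]
    | cons c cs =>
      simp only [List.length_cons] at hl
      rw [loopB_cons]
      by_cases hd : isDelim c
      · rw [if_neg (by simp [hd])]
        -- the handler equals loopA (c :: cs)
        have key :
            (if c = '-' ∧ cs.head? = some '-' then loopB (lineB cs.tail) []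
             else if c = '(' ∧ cs.head? = some '*' then loopB (blockB cs.tail) []
             else c :: loopB cs []) = loopA (c :: cs) := by
          rw [loopA_cons, nextWord_delim c cs hd]
          rw [if_neg (single_not_keyword c)]
          by_cases hm : c = '-'
          · subst hm
            rw [if_pos rfl]
            cases cs with
            | nil =>
              rw [nextWord_nil]
              simp [loopB_nil, loopA_nil, flushB]
            | cons d ds =>
              simp only [List.length_cons] at hl
              by_cases hdd : isDelim d
              · rw [nextWord_delim d ds hdd]
                by_cases hd2 : d = '-'
                · subst hd2
                  simp only [List.head?_cons, List.tail_cons,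
                    true_and, Option.some.injEq]
                  rw [skipLineA_eq_lineB ds.length ds le_rfl ['-'] (by decide)]
                  have hlen : (lineB ds).length ≤ n := by
                    have := lineB_length_le ds
                    omega
                  rw [ih (lineB ds) [] hlen (by simp)]
                  simp
                · rw [ih (d :: ds) [] (by simp; omega) (by simp)]
                  simp [hd2]
              · rw [nextWord_nondelim d ds (by simpa using hdd)]
                have hchars := (takeWord_decomp (d :: ds)).2
                have hne : (takeWord (d :: ds)).1 ≠ ['-'] :=
                  word_ne_single _ hchars '-' (by decide)
                rw [if_neg hne]
                have hd2 : d ≠ '-' := by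
                  intro h; subst h; simp [isDelim] at hdd
                rw [ih (d :: ds) [] (by simp; omega) (by simp)]
                simp [hd2]
          · by_cases hp : c = '('
            · subst hp
              have g1 : ¬(['('] = ['-']) := by simp
              rw [if_neg g1, if_pos rfl]
              cases cs with
              | nil =>
                rw [nextWord_nil]
                simp [loopB_nil, loopA_nil, flushB]
              | cons d ds =>
                simp only [List.length_cons] at hl
                by_cases hdd : isDelim d
                · rw [nextWord_delim d ds hdd]
                  by_cases hd2 : d = '*'
                  · subst hd2
                    have g2 : ¬('(' = '-' ∧ (('*' : Char) :: ds).head? = some '-') := by simp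
                    have g3 : ('(' = '(' ∧ (('*' : Char) :: ds).head? = some '*') := by simp
                    rw [if_pos rfl, if_neg g2, if_pos g3]
                    simp only [List.tail_cons]

                    rw [skipBlockA_eq_blockB ds.length ds le_rfl]
                    have hlen : (blockB ds).length ≤ n := by
                      have := blockB_length_le ds
                      omega
                    rw [ih (blockB ds) [] hlen (by simp)]
                    simp
                  · rw [ih (d :: ds) [] (by simp; omega) (by simp)]
                    simp [hd2]
                · rw [nextWord_nondelim d ds (by simpa using hdd)]
                  have hchars := (takeWord_decomp (d :: ds)).2
                  have hne : (takeWord (d :: ds)).1 ≠ ['*'] :=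
                    word_ne_single _ hchars '*' (by decide)
                  rw [if_neg hne]
                  have hd2 : d ≠ '*' := by
                    intro h; subst h; simp [isDelim] at hdd
                  rw [ih (d :: ds) [] (by simp; omega) (by simp)]
                  simp [hd2]
            · rw [ih cs [] (by omega) (by simp)]
              simp [hm, hp]
        rw [key, loopA_word_prefix buf c cs hb hd]
      · rw [if_pos (by simp [hd])]
        rw [ih cs (buf ++ [c]) (by omega) ?_]
        · simp
        · intro x hx
          simp at hx
          rcases hx with hx | rfl
          · exact hb x hx
          · simpa using hd

-- ===== VERDICT (by name: the statement is the Claim_ definition above) =====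
theorem preprocess_program_spec : Claim_equal_preprocess_program := by
  intro program _
  unfold Spec_preprocess_program preprocess_program preprocess_program_alt
  rw [loopB_eq_loopA program.toList.length program.toList [] le_rfl (by simp)]
  rfl
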